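-- pv_equiv track=rewrite | github.com/mohnishc07/spectre | crawler.py | pick_url_from_sitemap
-- ===== SOURCE A (Python) =====
-- def pick_url_from_sitemap(sitemap_urls: list[str], keywords: list[str]) -> str | None:
--     """
--     Pick the best URL from a sitemap that matches one of the given keywords.
--     Returns None if no match. Prefers URLs with shorter paths (closer to root)
--     when multiple match — /pricing beats /resources/blog/pricing-guide.
--     """
--     matches = []
--     for url in sitemap_urls:
--         url_lower = url.lower()
--         for kw_idx, kw in enumerate(keywords):
--             if kw in url_lower:
--                 # (keyword index, path length) — lower is better on both
--                 path = url.split("://", 1)[-1].split("/", 1)[-1] if "/" in url else ""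
--                 matches.append((kw_idx, len(path), url))
--                 break
--     if not matches:
--         return None
--     matches.sort()
--     return matches[0][2]
-- ===== SOURCE B (Python) =====
-- def _path(url):
--     return url.split("://", 1)[-1].split("/", 1)[-1] if "/" in url else ""
--
--
-- def pick_url_from_sitemap(sitemap_urls: list[str], keywords: list[str]) -> str | None:
--     """Keyword-major scan: for each keyword in priority order, take the best
--     (shortest path, then lexicographically smallest URL) among URLs containing
--     it; the first keyword with any match wins. This agrees with A's first-match
--     tuple sort: if an earlier keyword matched any URL we'd already have returned,
--     so every URL matching this keyword has it as its first match."""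
--     for kw in keywords:
--         best = None
--         for url in sitemap_urls:
--             if kw in url.lower():
--                 cand = (len(_path(url)), url)
--                 if best is None or cand < best:
--                     best = cand
--         if best is not None:
--             return best[1]
--     return None
-- ===== Notes on version B (the rewrite author's own statement) =====
-- stated objective: faster
-- what changed: B inverts the loop nesting: instead of collecting (kw_idx, path_len, url) tuples over all URLs and sorting them, it scans keywords in priority order and returns the best (shortest-path, then lexicographically smallest) URL for the first keyword that matches any URL, with no match list and no sort.
import Mathlib
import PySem

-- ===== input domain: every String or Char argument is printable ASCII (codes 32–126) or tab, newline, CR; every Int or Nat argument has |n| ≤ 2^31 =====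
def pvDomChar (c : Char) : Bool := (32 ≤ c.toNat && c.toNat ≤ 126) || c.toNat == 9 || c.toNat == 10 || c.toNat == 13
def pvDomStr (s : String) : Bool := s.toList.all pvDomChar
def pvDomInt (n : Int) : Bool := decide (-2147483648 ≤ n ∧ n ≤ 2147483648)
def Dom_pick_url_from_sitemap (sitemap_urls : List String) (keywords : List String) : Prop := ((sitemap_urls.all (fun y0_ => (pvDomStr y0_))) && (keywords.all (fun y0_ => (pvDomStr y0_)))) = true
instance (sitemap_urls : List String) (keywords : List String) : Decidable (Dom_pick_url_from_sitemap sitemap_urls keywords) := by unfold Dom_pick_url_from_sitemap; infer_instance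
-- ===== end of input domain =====

-- B inverts the loop nesting: it scans keywords in priority order and returns the best matching URL
-- for the first keyword that matches at all, with no match list and no sort (objective: faster, as measured).

-- ===== PORT A =====
-- the match tuple (kw_idx, len(path), url)
abbrev PvT := Nat × Int × String

-- Python's '<' on such 3-tuples (lexicographic); used by A's matches.sort()
def pvLt (a b : PvT) : Bool :=
  decide (a.1 < b.1) || (decide (a.1 = b.1) && (decide (a.2.1 < b.2.1) || (decide (a.2.1 = b.2.1) && decide (a.2.2 < b.2.2))))

-- path = url.split("://", 1)[-1].split("/", 1)[-1] if "/" in url else ""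
def pvPath (url : String) : String :=
  if PySem.Str.isIn "/" url then
    let p1 := (PySem.Str.splitMax? url "://" 1).getD []
    let s1 := p1.getLastD ""
    let p2 := (PySem.Str.splitMax? s1 "/" 1).getD []
    p2.getLastD ""
  else ""

-- the inner 'for kw_idx, kw in enumerate(keywords): if kw in url_lower: … break' loop:
-- index of the first keyword contained in url_lower
def pvFindKw (urlLower : String) (kws : List String) (i : Nat) : Option Nat :=
  match kws with
  | [] => none
  | k :: t => if PySem.Str.isIn k urlLower then some i else pvFindKw urlLower t (i + 1)

-- the tuple appended to matches for one url, if some keyword matches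
def pvCand (keywords : List String) (url : String) : Option PvT :=
  match pvFindKw (PySem.Str.lower url) keywords 0 with
  | none => none
  | some i => some (i, PySem.Str.len (pvPath url), url)

-- matches.sort() is ported as PySem's stable insertion sort (= PySem.List.sorted's rfl implementation) under Python's tuple order pvLt
def pick_url_from_sitemap (sitemap_urls : List String) (keywords : List String) : Option String :=
  let ms : List PvT := sitemap_urls.foldl (fun acc url =>
    match pvCand keywords url with
    | none => acc
    | some m => acc ++ [m]) []
  match ms with
  | [] => none
  | _ :: _ =>
    match ms.foldl (fun acc x => PySem.List.insertBy pvLt x acc) [] with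
    | [] => none
    | m :: _ => some m.2.2

-- ===== PORT B =====
-- Python's '<' on B's 2-tuples (len(path), url)
def pvBLt (a b : Int × String) : Bool :=
  decide (a.1 < b.1) || (decide (a.1 = b.1) && decide (a.2 < b.2))

-- B's _path helper (same code as A's inline path expression)
def pvBPath (url : String) : String :=
  if PySem.Str.isIn "/" url then
    let p1 := (PySem.Str.splitMax? url "://" 1).getD []
    let s1 := p1.getLastD ""
    let p2 := (PySem.Str.splitMax? s1 "/" 1).getD []
    p2.getLastD ""
  else ""

-- the outer 'for kw in keywords' loop with its early return
def pvBGo (sitemap_urls : List String) : List String → Option String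
  | [] => none
  | kw :: rest =>
    let best : Option (Int × String) := sitemap_urls.foldl (fun best url =>
      if PySem.Str.isIn kw (PySem.Str.lower url) then
        let cand := (PySem.Str.len (pvBPath url), url)
        match best with
        | none => some cand
        | some b => if pvBLt cand b then some cand else some b
      else best) none
    match best with
    | none => pvBGo sitemap_urls rest
    | some b => some b.2

def pick_url_from_sitemap_alt (sitemap_urls : List String) (keywords : List String) : Option String :=
  pvBGo sitemap_urls keywords

-- ===== PRECONDITION & SPEC =====
def Spec_pick_url_from_sitemap (sitemap_urls : List String) (keywords : List String) (out : Option String) : Prop := out = pick_url_from_sitemap_alt sitemap_urls keywords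
instance (sitemap_urls : List String) (keywords : List String) (out : Option String) : Decidable (Spec_pick_url_from_sitemap sitemap_urls keywords out) := by unfold Spec_pick_url_from_sitemap; infer_instance

-- ===== CLAIM (what is proved, stated in full; the proofs are below) =====
def Claim_equal_pick_url_from_sitemap : Prop := ∀ (sitemap_urls : List String) (keywords : List String), Dom_pick_url_from_sitemap sitemap_urls keywords → Spec_pick_url_from_sitemap sitemap_urls keywords (pick_url_from_sitemap sitemap_urls keywords)

-- ===== LEMMAS AND PROOFS =====

-- generic running-minimum step (selection by a boolean strict order)
def pvSel {α : Type} (lt : α → α → Bool) (b : Option α) (x : α) : Option α :=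
  match b with
  | none => some x
  | some y => if lt x y then some x else some y

lemma pvSel_isSome {α : Type} (lt : α → α → Bool) (l : List α) (b : α) :
    ∃ m, l.foldl (pvSel lt) (some b) = some m := by
  induction l generalizing b with
  | nil => exact ⟨b, rfl⟩
  | cons h t ih =>
    simp only [List.foldl_cons, pvSel]
    split_ifs <;> exact ih _

lemma pvSel_none_eq_nil {α : Type} (lt : α → α → Bool) (l : List α) :
    l.foldl (pvSel lt) none = none → l = [] := by
  cases l with
  | nil => intro; rfl
  | cons h t =>
    intro hc
    simp only [List.foldl_cons, pvSel] at hc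
    obtain ⟨m, hm⟩ := pvSel_isSome lt t h
    rw [hm] at hc; exact absurd hc (by simp)

-- invariant of the running minimum: the result is a member and no element beats it
lemma pvSel_inv {α : Type} (lt : α → α → Bool)
    (htr : ∀ a b c, lt a b = true → lt b c = true → lt a c = true)
    (hir : ∀ a, lt a a = false) :
    ∀ (l : List α) (b m : α), l.foldl (pvSel lt) (some b) = some m →
      (m = b ∨ m ∈ l) ∧ (lt m b = true ∨ m = b) ∧ ∀ x ∈ l, lt x m = false := by
  intro l
  induction l with
  | nil =>
    intro b m h
    simp only [List.foldl_nil, Option.some_inj] at h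
    exact ⟨Or.inl h.symm, Or.inr h.symm, by simp⟩
  | cons a t ih =>
    intro b m h
    simp only [List.foldl_cons, pvSel] at h
    by_cases hab : lt a b = true
    · rw [if_pos hab] at h
      obtain ⟨hmem, hlt, hall⟩ := ih a m h
      refine ⟨Or.inr (by rcases hmem with h1 | h1 <;> simp [h1]),
        Or.inl (by rcases hlt with h1 | h1; exacts [htr m a b h1 hab, h1 ▸ hab]), ?_⟩
      intro x hx
      rcases List.mem_cons.mp hx with rfl | hx
      · by_cases hxm : lt x m = true
        · rcases hlt with h1 | h1
          · exact absurd (htr x m x hxm h1) (by simp [hir])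
          · rw [h1] at hxm; exact absurd hxm (by simp [hir])
        · simpa using hxm
      · exact hall x hx
    · rw [if_neg hab] at h
      obtain ⟨hmem, hlt, hall⟩ := ih b m h
      refine ⟨(by rcases hmem with h1 | h1; exacts [Or.inl h1, Or.inr (by simp [h1])]), hlt, ?_⟩
      intro x hx
      rcases List.mem_cons.mp hx with rfl | hx
      · by_cases hxm : lt x m = true
        · rcases hlt with h1 | h1
          · exact absurd (htr x m b hxm h1) hab
          · rw [h1] at hxm; exact absurd hxm hab
        · simpa using hxm
      · exact hall x hx

lemma pvSel_min {α : Type} (lt : α → α → Bool)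
    (htr : ∀ a b c, lt a b = true → lt b c = true → lt a c = true)
    (hir : ∀ a, lt a a = false)
    (l : List α) (m : α) (h : l.foldl (pvSel lt) none = some m) :
    m ∈ l ∧ ∀ x ∈ l, lt x m = false := by
  cases l with
  | nil => simp at h
  | cons a t =>
    simp only [List.foldl_cons, pvSel] at h
    obtain ⟨hmem, hlt, hall⟩ := pvSel_inv lt htr hir t a m h
    refine ⟨(by rcases hmem with h1 | h1 <;> simp [h1]), ?_⟩
    intro x hx
    rcases List.mem_cons.mp hx with rfl | hx
    · by_cases hxm : lt x m = true
      · rcases hlt with h1 | h1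
        · exact absurd (htr x m x hxm h1) (by simp [hir])
        · rw [h1] at hxm; exact absurd hxm (by simp [hir])
      · simpa using hxm
    · exact hall x hx

-- order facts for pvLt and pvBLt
lemma pvBLt_irrefl (a : Int × String) : pvBLt a a = false := by
  simp [pvBLt]

lemma pvBLt_trans (a b c : Int × String) (h1 : pvBLt a b = true) (h2 : pvBLt b c = true) :
    pvBLt a c = true := by
  simp only [pvBLt, Bool.or_eq_true, Bool.and_eq_true, decide_eq_true_eq] at *
  rcases h1 with h1 | ⟨h1e, h1s⟩ <;> rcases h2 with h2 | ⟨h2e, h2s⟩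
  · exact Or.inl (lt_trans h1 h2)
  · exact Or.inl (h2e ▸ h1)
  · exact Or.inl (h1e ▸ h2)
  · exact Or.inr ⟨h1e.trans h2e, lt_trans h1s h2s⟩

lemma pvLt_irrefl (a : PvT) : pvLt a a = false := by
  simp [pvLt]

lemma pvLt_trans (a b c : PvT) (h1 : pvLt a b = true) (h2 : pvLt b c = true) :
    pvLt a c = true := by
  simp only [pvLt, Bool.or_eq_true, Bool.and_eq_true, decide_eq_true_eq] at *
  rcases h1 with h1 | ⟨h1e, h1r⟩
  · rcases h2 with h2 | ⟨h2e, _⟩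
    · exact Or.inl (lt_trans h1 h2)
    · exact Or.inl (h2e ▸ h1)
  · rcases h2 with h2 | ⟨h2e, h2r⟩
    · exact Or.inl (h1e ▸ h2)
    · refine Or.inr ⟨h1e.trans h2e, ?_⟩
      rcases h1r with h1 | ⟨h1e', h1s⟩ <;> rcases h2r with h2 | ⟨h2e', h2s⟩
      · exact Or.inl (lt_trans h1 h2)
      · exact Or.inl (h2e' ▸ h1)
      · exact Or.inl (h1e' ▸ h2)
      · exact Or.inr ⟨h1e'.trans h2e', lt_trans h1s h2s⟩

lemma pvLt_total (a b : PvT) (h1 : pvLt a b = false) (h2 : pvLt b a = false) : a = b := by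
  rcases lt_trichotomy a.1 b.1 with h | h | h
  · exact absurd h1 (by simp [pvLt, h])
  · rcases lt_trichotomy a.2.1 b.2.1 with g | g | g
    · exact absurd h1 (by simp [pvLt, h, g])
    · rcases lt_trichotomy a.2.2 b.2.2 with f | f | f
      · exact absurd h1 (by simp [pvLt, h, g, f])
      · exact Prod.ext h (Prod.ext g f)
      · exact absurd h2 (by simp [pvLt, h.symm, g.symm, f])
    · exact absurd h2 (by simp [pvLt, h.symm, g])
  · exact absurd h2 (by simp [pvLt, h])

-- shared structure: pvLt on equal first components is pvBLt; larger first component never wins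
lemma pvLt_same_fst (i : Nat) (p q : Int × String) : pvLt (i, p) (i, q) = pvBLt p q := by
  simp [pvLt, pvBLt]

lemma pvLt_fst_gt (x : PvT) (i : Nat) (p : Int × String) (h : i < x.1) :
    pvLt x (i, p) = false := by
  simp only [pvLt, Bool.or_eq_false_iff, Bool.and_eq_false_iff]
  constructor
  · simp; omega
  · left; simp; omega

-- A's match-collecting fold is filterMap
lemma pvMatches_eq (urls : List String) (keywords : List String) (acc : List PvT) :
    urls.foldl (fun acc url =>
      match pvCand keywords url with
      | none => acc
      | some m => acc ++ [m]) acc = acc ++ urls.filterMap (pvCand keywords) := by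
  induction urls generalizing acc with
  | nil => simp
  | cons u t ih =>
    simp only [List.foldl_cons, List.filterMap_cons]
    cases pvCand keywords u <;> simp [ih]

-- inserting x changes the head exactly the way the running-minimum step does
lemma pvHead_insertBy (x : PvT) (l : List PvT) :
    (PySem.List.insertBy pvLt x l).head? = pvSel pvLt l.head? x := by
  cases l with
  | nil => simp [PySem.List.insertBy, pvSel]
  | cons h t =>
    simp only [PySem.List.insertBy, List.head?_cons, pvSel]
    split_ifs <;> simp

-- head of A's insertion sort = running minimum (both keep the earlier element on ties)
lemma pvHead_sort_eq_min (ms : List PvT) (acc : List PvT) :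
    (ms.foldl (fun acc x => PySem.List.insertBy pvLt x acc) acc).head? = ms.foldl (pvSel pvLt) acc.head? := by
  induction ms generalizing acc with
  | nil => rfl
  | cons x t ih =>
    simp only [List.foldl_cons]
    rw [ih, pvHead_insertBy]

-- B's candidate for one keyword
def pvCandB (kw url : String) : Option (Int × String) :=
  if PySem.Str.isIn kw (PySem.Str.lower url) then some (PySem.Str.len (pvBPath url), url) else none

-- B's inner fold over urls is the running minimum over its candidate list
lemma pvBBest_eq (urls : List String) (kw : String) (acc : Option (Int × String)) :
    urls.foldl (fun best url =>
      if PySem.Str.isIn kw (PySem.Str.lower url) then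
        let cand := (PySem.Str.len (pvBPath url), url)
        match best with
        | none => some cand
        | some b => if pvBLt cand b then some cand else some b
      else best) acc
    = (urls.filterMap (pvCandB kw)).foldl (pvSel pvBLt) acc := by
  induction urls generalizing acc with
  | nil => rfl
  | cons u t ih =>
    simp only [List.foldl_cons, List.filterMap_cons]
    by_cases h : PySem.Str.isIn kw (PySem.Str.lower u) = true
    · rw [show pvCandB kw u = some (PySem.Str.len (pvBPath u), u) from by unfold pvCandB; rw [if_pos h], if_pos h]
      cases acc with
      | none => exact ih _
      | some b => exact ih _
    · rw [show pvCandB kw u = none from by unfold pvCandB; rw [if_neg h], if_neg h]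
      exact ih acc

-- A's candidate generalized to a starting keyword index
def pvCandFrom (keywords : List String) (i : Nat) (url : String) : Option PvT :=
  match pvFindKw (PySem.Str.lower url) keywords i with
  | none => none
  | some j => some (j, PySem.Str.len (pvPath url), url)

lemma pvFindKw_ge (kws : List String) (ul : String) (i j : Nat)
    (h : pvFindKw ul kws i = some j) : i ≤ j := by
  induction kws generalizing i with
  | nil => simp [pvFindKw] at h
  | cons k t ih =>
    simp only [pvFindKw] at h
    split_ifs at h
    · simp only [Option.some_inj] at h; omega
    · have := ih (i + 1) h; omega

lemma pvFindKw_cons (ul k : String) (s : List String) (i : Nat) :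
    pvFindKw ul (k :: s) i = if PySem.Str.isIn k ul then some i else pvFindKw ul s (i + 1) := rfl

lemma pvCandFrom_cons (k : String) (s : List String) (i : Nat) (url : String) :
    pvCandFrom (k :: s) i url =
      if PySem.Str.isIn k (PySem.Str.lower url) then some (i, PySem.Str.len (pvPath url), url)
      else pvCandFrom s (i + 1) url := by
  unfold pvCandFrom
  rw [pvFindKw_cons]
  by_cases h : PySem.Str.isIn k (PySem.Str.lower url) = true
  · rw [if_pos h, if_pos h]
  · rw [if_neg h, if_neg h]

lemma pvCandFrom_ge (s : List String) (i : Nat) (url : String) (x : PvT)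
    (h : pvCandFrom s i url = some x) : i ≤ x.1 := by
  unfold pvCandFrom at h
  cases hf : pvFindKw (PySem.Str.lower url) s i with
  | none => rw [hf] at h; simp at h
  | some j =>
    rw [hf] at h
    simp only [Option.some_inj] at h
    have := pvFindKw_ge s (PySem.Str.lower url) i j hf
    simp [← h]; omega

lemma pvBPath_eq (url : String) : pvBPath url = pvPath url := rfl

-- the key induction: B's keyword-major scan computes the url of the minimum of A's match list
lemma pvGo_eq (urls : List String) (t : List String) (i : Nat) :
    pvBGo urls t = Option.map (fun m : PvT => m.2.2)
      ((urls.filterMap (pvCandFrom t i)).foldl (pvSel pvLt) none) := by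
  induction t generalizing i with
  | nil => simp [pvBGo, pvCandFrom, pvFindKw]
  | cons k s ih =>
    simp only [pvBGo]
    rw [pvBBest_eq]
    cases hb : (urls.filterMap (pvCandB k)).foldl (pvSel pvBLt) none with
    | none =>
      -- no url contains k: A's candidates for (k :: s) at i are exactly those for s at i+1
      have hnil := pvSel_none_eq_nil pvBLt _ hb
      have hnone : ∀ u ∈ urls, pvCandB k u = none := List.filterMap_eq_nil_iff.mp hnil
      have hcong : urls.filterMap (pvCandFrom (k :: s) i) = urls.filterMap (pvCandFrom s (i + 1)) := by
        apply List.filterMap_congr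
        intro u hu
        have := hnone u hu
        unfold pvCandB at this
        rw [pvCandFrom_cons]
        split_ifs with h
        · rw [if_pos h] at this; simp at this
        · rfl
      simp only [hcong]
      exact ih (i + 1)
    | some b =>
      -- some url contains k: the global minimum is (i, b)
      obtain ⟨hbmem, hbmin⟩ := pvSel_min pvBLt pvBLt_trans pvBLt_irrefl _ b hb
      obtain ⟨u0, hu0, hcu0⟩ := List.mem_filterMap.mp hbmem
      unfold pvCandB at hcu0
      have hin0 : PySem.Str.isIn k (PySem.Str.lower u0) = true := by
        by_contra hh
        rw [if_neg hh] at hcu0; exact absurd hcu0 (by simp)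
      rw [if_pos hin0] at hcu0
      simp only [Option.some_inj] at hcu0
      -- (i, b) is a candidate of the (k :: s) list
      have hibmem : (i, b.1, b.2) ∈ urls.filterMap (pvCandFrom (k :: s) i) := by
        refine List.mem_filterMap.mpr ⟨u0, hu0, ?_⟩
        rw [pvCandFrom_cons, if_pos hin0, ← hcu0, pvBPath_eq]
      -- and nothing beats it
      have hibmin : ∀ x ∈ urls.filterMap (pvCandFrom (k :: s) i), pvLt x (i, b.1, b.2) = false := by
        intro x hx
        obtain ⟨u, hu, hcu⟩ := List.mem_filterMap.mp hx
        rw [pvCandFrom_cons] at hcu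
        by_cases hin : PySem.Str.isIn k (PySem.Str.lower u)
        · rw [if_pos hin] at hcu
          simp only [Option.some_inj] at hcu
          have hpmem : (PySem.Str.len (pvBPath u), u) ∈ urls.filterMap (pvCandB k) := by
            refine List.mem_filterMap.mpr ⟨u, hu, ?_⟩
            unfold pvCandB
            rw [if_pos hin]
          have := hbmin _ hpmem
          subst hcu
          calc pvLt (i, PySem.Str.len (pvPath u), u) (i, b.1, b.2)
              = pvBLt (PySem.Str.len (pvPath u), u) (b.1, b.2) := pvLt_same_fst _ _ _
            _ = false := by rw [← pvBPath_eq]; simpa using this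
        · rw [if_neg hin] at hcu
          have := pvCandFrom_ge s (i + 1) u x hcu
          exact pvLt_fst_gt x i (b.1, b.2) (by omega)
      -- the fold over the (k :: s) candidates returns some minimum m; by uniqueness m = (i, b)
      cases hL : urls.filterMap (pvCandFrom (k :: s) i) with
      | nil => rw [hL] at hibmem; simp at hibmem
      | cons y ys =>
        have hfold : ∃ m, (y :: ys).foldl (pvSel pvLt) none = some m := by
          simpa [List.foldl_cons, pvSel] using pvSel_isSome pvLt ys y
        obtain ⟨m, hm⟩ := hfold
        obtain ⟨hmmem, hmmin⟩ := pvSel_min pvLt pvLt_trans pvLt_irrefl _ m hm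
        have hmb : m = (i, b.1, b.2) := by
          apply pvLt_total
          · exact hibmin m (hL ▸ hmmem)
          · exact hmmin _ (hL ▸ hibmem)
        rw [hm, hmb]
        rfl

-- ===== VERDICT (by name: the statement is the Claim_ definition above) =====
theorem pick_url_from_sitemap_spec : Claim_equal_pick_url_from_sitemap := by
  intro urls keywords _
  unfold Spec_pick_url_from_sitemap pick_url_from_sitemap pick_url_from_sitemap_alt
  rw [pvMatches_eq]
  simp only [List.nil_append]
  have hcand : pvCand keywords = pvCandFrom keywords 0 := by
    funext url; rfl
  rw [pvGo_eq urls keywords 0, ← hcand]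
  cases hms : urls.filterMap (pvCand keywords) with
  | nil => simp
  | cons x t =>
    rw [show ((x :: t).foldl (fun acc y => PySem.List.insertBy pvLt y acc) []) =
        ((x :: t).foldl (fun acc y => PySem.List.insertBy pvLt y acc) []) from rfl]
    have h := pvHead_sort_eq_min (x :: t) []
    simp only [List.head?_nil] at h
    cases hs : (x :: t).foldl (fun acc y => PySem.List.insertBy pvLt y acc) [] with
    | nil =>
      exfalso
      rw [hs] at h
      simp only [List.head?_nil, List.foldl_cons, pvSel] at h
      obtain ⟨c, hc⟩ := pvSel_isSome pvLt t x
      exact Option.some_ne_none c (h.trans hc).symm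
    | cons m t' =>
      rw [hs] at h
      simp only [List.head?_cons] at h
      cases hfold : (x :: t).foldl (pvSel pvLt) none with
      | none => rw [hfold] at h; exact absurd h (by simp)
      | some b => rw [hfold] at h; simp only [Option.some_inj] at h; simp [← h]
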